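-- pv_equiv track=rewrite | github.com/Song-Juntae/baekjoonhub | 프로그래머스/unrated/120956. 옹알이 （1）/옹알이 （1）.py | solution
-- ===== SOURCE A (Python) =====
-- from itertools import permutations
--
-- def solution(babbling):
--     word = []
--     for i in range(1,5):
--         for j in permutations(["aya", "ye", "woo", "ma"], i):
--             word.append(''.join(j))
--     cnt = 0
--     for i in babbling:
--         if i in word:
--             cnt += 1
--     return cnt
-- ===== SOURCE B (Python) =====
-- def solution(babbling):
--     # Parse each string greedily instead of enumerating all 64 permutations:
--     # the first character uniquely identifies the candidate sound.
--     sounds = {'a': 'aya', 'y': 'ye', 'w': 'woo', 'm': 'ma'}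
--     cnt = 0
--     for s in babbling:
--         used = set()
--         ok = True
--         rest = s
--         while rest and ok:
--             w = sounds.get(rest[0])
--             if w is None or w in used or not rest.startswith(w):
--                 ok = False
--             else:
--                 used.add(w)
--                 rest = rest[len(w):]
--         if ok and used:
--             cnt += 1
--     return cnt
-- ===== Notes on version B (the rewrite author's own statement) =====
-- stated objective: faster
-- what changed: B drops A's 64-permutation table and membership scan: each string is parsed greedily (first char picks the unique candidate sound, which must be an unused prefix), counting strings fully consumed with at least one sound used.
import Mathlib
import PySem

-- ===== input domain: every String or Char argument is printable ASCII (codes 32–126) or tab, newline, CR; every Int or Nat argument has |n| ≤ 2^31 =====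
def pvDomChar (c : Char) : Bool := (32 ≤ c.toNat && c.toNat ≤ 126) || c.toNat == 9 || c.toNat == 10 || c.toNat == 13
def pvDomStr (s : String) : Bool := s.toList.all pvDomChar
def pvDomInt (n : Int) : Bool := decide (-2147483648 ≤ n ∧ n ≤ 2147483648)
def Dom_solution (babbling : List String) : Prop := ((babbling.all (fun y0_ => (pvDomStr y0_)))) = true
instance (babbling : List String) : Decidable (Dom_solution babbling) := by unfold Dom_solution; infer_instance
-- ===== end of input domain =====

-- B parses each babbling string greedily (first char picks the unique candidate
-- sound) instead of building A's table of 64 permutation strings; return value only.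


-- ===== PORT A =====
-- A's word table: for i in range(1,5): for j in permutations([...], i): word.append(''.join(j))
def wordA : List String :=
  (PySem.List.pyRange 1 5 1).foldl
    (fun w i =>
      (PySem.List.permutations ["aya", "ye", "woo", "ma"] i.toNat).foldl
        (fun w j => w ++ [PySem.Str.join "" j]) w)
    []

def solution (babbling : List String) : Int :=
  babbling.foldl (fun cnt i => if wordA.contains i then cnt + 1 else cnt) 0

-- ===== PORT B =====
-- the while-loop of Source B: first char selects the candidate sound, which must be
-- an unused prefix; state = the four used-flags; at the end at least one must be used
def parseB : List Char → Bool → Bool → Bool → Bool → Bool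
  | [], ua, uy, uw, um => ua || uy || uw || um
  | 'a'::'y'::'a'::rest, ua, uy, uw, um => if ua then false else parseB rest true uy uw um
  | 'y'::'e'::rest, ua, uy, uw, um => if uy then false else parseB rest ua true uw um
  | 'w'::'o'::'o'::rest, ua, uy, uw, um => if uw then false else parseB rest ua uy true um
  | 'm'::'a'::rest, ua, uy, uw, um => if um then false else parseB rest ua uy uw true
  | _, _, _, _, _ => false

def solution_alt (babbling : List String) : Int :=
  babbling.foldl
    (fun cnt s => if parseB s.toList false false false false then cnt + 1 else cnt) 0

-- ===== PRECONDITION & SPEC =====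
def Spec_solution (babbling : List String) (out : Int) : Prop := out = solution_alt babbling
instance (babbling : List String) (out : Int) : Decidable (Spec_solution babbling out) := by unfold Spec_solution; infer_instance

-- ===== CLAIM (what is proved, stated in full; the proofs are below) =====
def Claim_equal_solution : Prop := ∀ (babbling : List String), Dom_solution babbling → Spec_solution babbling (solution babbling)

-- ===== LEMMAS AND PROOFS =====

-- all concatenations of permutations of sublists of a pool (fuel-driven so `decide` evaluates it)
def Lgen : Nat → List (List Char) → List (List Char)
  | 0, _ => [[]]
  | fuel+1, pool =>
      [] :: (List.range pool.length).flatMap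
        (fun i => (Lgen fuel (pool.eraseIdx i)).map (fun t => pool[i]! ++ t))

def avail (ua uy uw um : Bool) : List (List Char) :=
  (if ua then [] else [['a','y','a']]) ++ (if uy then [] else [['y','e']]) ++
  (if uw then [] else [['w','o','o']]) ++ (if um then [] else [['m','a']])

def M (ua uy uw um : Bool) : List (List Char) := Lgen 4 (avail ua uy uw um)

lemma nil_mem_M (ua uy uw um : Bool) : [] ∈ M ua uy uw um := by
  simp [M, Lgen]

lemma back : ∀ (ua uy uw um : Bool), ∀ cs ∈ M ua uy uw um,
    ((ua || uy || uw || um) = true ∨ cs ≠ []) → parseB cs ua uy uw um = true := by decide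

lemma step_a : ∀ (uy uw um : Bool), ∀ r ∈ M true uy uw um,
    ('a'::'y'::'a'::r) ∈ M false uy uw um := by decide

lemma step_y : ∀ (ua uw um : Bool), ∀ r ∈ M ua true uw um,
    ('y'::'e'::r) ∈ M ua false uw um := by decide

lemma step_w : ∀ (ua uy um : Bool), ∀ r ∈ M ua uy true um,
    ('w'::'o'::'o'::r) ∈ M ua uy false um := by decide

lemma step_m : ∀ (ua uy uw : Bool), ∀ r ∈ M ua uy uw true,
    ('m'::'a'::r) ∈ M ua uy uw false := by decide

lemma fwd : ∀ (cs : List Char) (ua uy uw um : Bool),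
    parseB cs ua uy uw um = true → cs ∈ M ua uy uw um := by
  intro cs ua uy uw um h
  fun_induction parseB cs ua uy uw um with
  | case1 a b c d => exact nil_mem_M a b c d
  | case2 rest uy uw um => exact absurd h (by simp)
  | case3 rest ua uy uw um hua ih =>
      have hf : ua = false := by simpa using hua
      subst hf; exact step_a uy uw um rest (ih h)
  | case4 rest ua uw um => exact absurd h (by simp)
  | case5 rest ua uy uw um huy ih =>
      have hf : uy = false := by simpa using huy
      subst hf; exact step_y ua uw um rest (ih h)
  | case6 rest ua uy um => exact absurd h (by simp)
  | case7 rest ua uy uw um huw ih =>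
      have hf : uw = false := by simpa using huw
      subst hf; exact step_w ua uy um rest (ih h)
  | case8 rest ua uy uw => exact absurd h (by simp)
  | case9 rest ua uy uw um hum ih =>
      have hf : um = false := by simpa using hum
      subst hf; exact step_m ua uy uw rest (ih h)
  | case10 => exact absurd h (by simp)

lemma sub1 : ∀ s ∈ wordA, (s.toList ∈ M false false false false ∧ s.toList ≠ []) := by decide

lemma sub2 : ∀ cs ∈ M false false false false, cs ≠ [] →
    cs ∈ wordA.map String.toList := by decide

lemma word_iff (s : String) :
    wordA.contains s = parseB s.toList false false false false := by
  by_cases hm : s ∈ wordA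
  · have ⟨h1, h2⟩ := sub1 s hm
    rw [List.contains_iff_mem.mpr hm, (back false false false false s.toList h1 (Or.inr h2)).symm]
  · have hp : parseB s.toList false false false false = false := by
      by_contra hne
      have hp' : parseB s.toList false false false false = true := by
        cases h : parseB s.toList false false false false
        · exact absurd h hne
        · rfl
      have hmem := fwd _ _ _ _ _ hp'
      have hnil : s.toList ≠ [] := by
        intro hn
        rw [hn] at hp'
        simp [parseB] at hp'
      have := sub2 _ hmem hnil
      obtain ⟨w, hw, hweq⟩ := List.mem_map.mp this
      exact hm (by rwa [String.toList_inj.mp hweq] at hw)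
    rw [hp]
    simp [hm]

lemma count_eq (bb : List String) (c : Int) :
    bb.foldl (fun cnt i => if wordA.contains i then cnt + 1 else cnt) c =
    bb.foldl (fun cnt s => if parseB s.toList false false false false then cnt + 1 else cnt) c := by
  induction bb generalizing c with
  | nil => rfl
  | cons x xs ih =>
      simp only [List.foldl]
      rw [word_iff]
      exact ih _

-- ===== VERDICT (by name: the statement is the Claim_ definition above) =====
theorem solution_spec : Claim_equal_solution := by
  intro babbling _
  unfold Spec_solution solution solution_alt
  exact count_eq babbling 0
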